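-- pv_equiv track=rewrite | github.com/MatthewJamesHanson/BinaryConverter | 12-9-17.py | binarySpacing
-- ===== SOURCE A (Python) =====
-- def binarySpacing(binaryResult, decimalFloat):
--     binaryListed = []
--
--     for i in binaryResult:
--         binaryListed.append(i)
--
--     if decimalFloat < 256:
--         while len(binaryListed) < 8:
--             binaryListed.insert(0, '0')
--
--         binary4 = binaryListed[0:4]
--         binary8 = binaryListed[4:8]
--         output = ''.join(binary4) + ' ' + ''.join(binary8)
--
--     elif decimalFloat >= 256 and decimalFloat < 4096:
--         while len(binaryListed) < 12:
--             binaryListed.insert(0, '0')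
--
--         binary4 = binaryListed[0:4]
--         binary8 = binaryListed[4:8]
--         binary12 = binaryListed[8:12]
--         output = ''.join(binary4) + ' ' + ''.join(binary8) + ' ' + ''.join(binary12)
--
--     elif decimalFloat >= 4096 and decimalFloat < 65536:
--         while len(binaryListed) < 16:
--             binaryListed.insert(0, '0')
--
--         binary4 = binaryListed[0:4]
--         binary8 = binaryListed[4:8]
--         binary12 = binaryListed[8:12]
--         binary16 = binaryListed[12:16]
--         output = ''.join(binary4) + ' ' + ''.join(binary8) + ' ' + ''.join(binary12) + ' ' + ''.join(binary16)
--
--     elif decimalFloat >= 65536 and decimalFloat < 16777216: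
--         while len(binaryListed) < 20:
--             binaryListed.insert(0, '0')
--
--         binary4 = binaryListed[0:4]
--         binary8 = binaryListed[4:8]
--         binary12 = binaryListed[8:12]
--         binary16 = binaryListed[12:16]
--         binary20 = binaryListed[16:20]
--         output = ''.join(binary4) + ' ' + ''.join(binary8) + ' ' + ''.join(binary12) + ' ' + ''.join(binary16) \
--                  + ' ' + ''.join(binary20)
--
--     elif decimalFloat >= 16777216 and decimalFloat < 268435456:
--         while len(binaryListed) < 24:
--             binaryListed.insert(0, '0')
--
--         binary4 = binaryListed[0:4]
--         binary8 = binaryListed[4:8]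
--         binary12 = binaryListed[8:12]
--         binary16 = binaryListed[12:16]
--         binary20 = binaryListed[16:20]
--         binary24 = binaryListed[20:24]
--         output = ''.join(binary4) + ' ' + ''.join(binary8) + ' ' + ''.join(binary12) + ' ' + ''.join(binary16) \
--                  + ' ' + ''.join(binary20) + ' ' + ''.join(binary24)
--
--     else:
--         output = binaryResult
--
--     return output
-- ===== SOURCE B (Python) =====
-- def binarySpacing(binaryResult, decimalFloat):
--     table = [(256, 8), (4096, 12), (65536, 16), (16777216, 20), (268435456, 24)]
--     for threshold, width in table:
--         if decimalFloat < threshold: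
--             padded = binaryResult.rjust(width, '0')[:width]
--             return ' '.join(padded[i:i+4] for i in range(0, width, 4))
--     return binaryResult
-- ===== Notes on version B (the rewrite author's own statement) =====
-- stated objective: simpler
-- what changed: Replaces A's six hardcoded per-width branches (each with its own char-by-char list build, pad-while-loop and explicit slice variables) by one (threshold,width) table scanned once plus a single generic rjust-truncate-and-chunk pass on the string.
import Mathlib
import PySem

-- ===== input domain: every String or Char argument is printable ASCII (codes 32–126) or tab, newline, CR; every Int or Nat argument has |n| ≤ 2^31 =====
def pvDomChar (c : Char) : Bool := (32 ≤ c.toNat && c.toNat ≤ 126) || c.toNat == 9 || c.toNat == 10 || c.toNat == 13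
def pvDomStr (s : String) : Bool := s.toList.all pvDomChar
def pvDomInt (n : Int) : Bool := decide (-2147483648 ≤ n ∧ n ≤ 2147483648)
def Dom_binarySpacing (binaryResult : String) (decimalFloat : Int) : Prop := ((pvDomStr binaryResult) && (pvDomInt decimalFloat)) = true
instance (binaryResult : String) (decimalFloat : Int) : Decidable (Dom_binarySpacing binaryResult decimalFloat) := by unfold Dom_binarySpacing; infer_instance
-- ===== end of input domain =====

-- B collapses A's six per-width branches into one table lookup and one generic chunking pass; objective: simpler.

-- ===== PORT A =====
-- the 'while len(binaryListed) < n: binaryListed.insert(0, '0')' loop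
def pvPad (n : Nat) (l : List Char) : List Char :=
  if l.length < n then pvPad n ('0' :: l) else l
termination_by n - l.length
decreasing_by simp only [List.length_cons]; omega

def binarySpacing (binaryResult : String) (decimalFloat : Int) : String :=
  -- for i in binaryResult: binaryListed.append(i)
  let binaryListed := binaryResult.toList.foldl (fun acc c => acc ++ [c]) []
  if decimalFloat < 256 then
    let bl := pvPad 8 binaryListed
    let b4 := PySem.List.slice bl (some 0) (some 4)
    let b8 := PySem.List.slice bl (some 4) (some 8)
    String.mk (b4 ++ [' '] ++ b8)
  else if 256 ≤ decimalFloat ∧ decimalFloat < 4096 then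
    let bl := pvPad 12 binaryListed
    let b4 := PySem.List.slice bl (some 0) (some 4)
    let b8 := PySem.List.slice bl (some 4) (some 8)
    let b12 := PySem.List.slice bl (some 8) (some 12)
    String.mk (b4 ++ [' '] ++ b8 ++ [' '] ++ b12)
  else if 4096 ≤ decimalFloat ∧ decimalFloat < 65536 then
    let bl := pvPad 16 binaryListed
    let b4 := PySem.List.slice bl (some 0) (some 4)
    let b8 := PySem.List.slice bl (some 4) (some 8)
    let b12 := PySem.List.slice bl (some 8) (some 12)
    let b16 := PySem.List.slice bl (some 12) (some 16)
    String.mk (b4 ++ [' '] ++ b8 ++ [' '] ++ b12 ++ [' '] ++ b16)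
  else if 65536 ≤ decimalFloat ∧ decimalFloat < 16777216 then
    let bl := pvPad 20 binaryListed
    let b4 := PySem.List.slice bl (some 0) (some 4)
    let b8 := PySem.List.slice bl (some 4) (some 8)
    let b12 := PySem.List.slice bl (some 8) (some 12)
    let b16 := PySem.List.slice bl (some 12) (some 16)
    let b20 := PySem.List.slice bl (some 16) (some 20)
    String.mk (b4 ++ [' '] ++ b8 ++ [' '] ++ b12 ++ [' '] ++ b16 ++ [' '] ++ b20)
  else if 16777216 ≤ decimalFloat ∧ decimalFloat < 268435456 then
    let bl := pvPad 24 binaryListed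
    let b4 := PySem.List.slice bl (some 0) (some 4)
    let b8 := PySem.List.slice bl (some 4) (some 8)
    let b12 := PySem.List.slice bl (some 8) (some 12)
    let b16 := PySem.List.slice bl (some 12) (some 16)
    let b20 := PySem.List.slice bl (some 16) (some 20)
    let b24 := PySem.List.slice bl (some 20) (some 24)
    String.mk (b4 ++ [' '] ++ b8 ++ [' '] ++ b12 ++ [' '] ++ b16 ++ [' '] ++ b20 ++ [' '] ++ b24)
  else
    binaryResult

-- ===== PORT B =====
-- padded = binaryResult.rjust(width,'0')[:width]; ' '.join(padded[i:i+4] for i in range(0,width,4))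
def pvAltFormat (s : List Char) (w : Nat) : String :=
  let padded := (List.replicate (w - s.length) '0' ++ s).take w
  String.mk (List.intercalate [' ']
    ((PySem.List.pyRange 0 (w : Int) 4).map
      (fun i => PySem.List.slice padded (some i) (some (i + 4)))))

-- the 'for threshold, width in table' loop with early return
def pvAltLoop (binaryResult : String) (decimalFloat : Int) : List (Int × Nat) → String
  | [] => binaryResult
  | (t, w) :: rest =>
    if decimalFloat < t then pvAltFormat binaryResult.toList w
    else pvAltLoop binaryResult decimalFloat rest

def binarySpacing_alt (binaryResult : String) (decimalFloat : Int) : String :=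
  pvAltLoop binaryResult decimalFloat
    [(256, 8), (4096, 12), (65536, 16), (16777216, 20), (268435456, 24)]

-- ===== PRECONDITION & SPEC =====
def Spec_binarySpacing (binaryResult : String) (decimalFloat : Int) (out : String) : Prop := out = binarySpacing_alt binaryResult decimalFloat
instance (binaryResult : String) (decimalFloat : Int) (out : String) : Decidable (Spec_binarySpacing binaryResult decimalFloat out) := by unfold Spec_binarySpacing; infer_instance

-- ===== CLAIM (what is proved, stated in full; the proofs are below) =====
def Claim_equal_binarySpacing : Prop := ∀ (binaryResult : String) (decimalFloat : Int), Dom_binarySpacing binaryResult decimalFloat → Spec_binarySpacing binaryResult decimalFloat (binarySpacing binaryResult decimalFloat)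

-- ===== LEMMAS AND PROOFS =====
theorem pvFoldlAppend (l acc : List Char) :
    l.foldl (fun acc c => acc ++ [c]) acc = acc ++ l := by
  induction l generalizing acc with
  | nil => simp
  | cons c t ih => simp [List.foldl, ih]

theorem pvPad_eq (n : Nat) : ∀ (k : Nat) (l : List Char), n - l.length = k →
    pvPad n l = List.replicate (n - l.length) '0' ++ l := by
  intro k
  induction k with
  | zero =>
    intro l h
    rw [pvPad.eq_def]
    simp only [if_neg (by omega : ¬ l.length < n)]
    simp [h]
  | succ k ih =>
    intro l h
    rw [pvPad.eq_def]
    have hlt : l.length < n := by omega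
    simp only [if_pos hlt]
    rw [ih ('0' :: l) (by simp; omega)]
    have : n - l.length = (n - ('0' :: l).length) + 1 := by simp; omega
    rw [this, List.replicate_succ']
    simp

theorem pvSliceTakeN (p : List Char) (w : Nat) (b : Int) (hb0 : 0 ≤ b) (hb : b.toNat ≤ w) :
    PySem.List.slice (p.take w) none (some b) = PySem.List.slice p none (some b) := by
  rw [PySem.List.slice_to (p.take w) hb0, PySem.List.slice_to p hb0, List.take_take]
  congr 1
  omega

theorem pvSliceTakeI (p : List Char) (w : Nat) (a b : Int) (ha : 0 ≤ a) (hb0 : 0 ≤ b)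
    (hb : b.toNat ≤ w) :
    PySem.List.slice (p.take w) (some a) (some b) = PySem.List.slice p (some a) (some b) := by
  rw [PySem.List.slice_toNat (p.take w) ha hb0, PySem.List.slice_toNat p ha hb0, List.drop_take,
    List.take_take]
  congr 1
  omega

theorem binarySpacing_spec : Claim_equal_binarySpacing := by
  intro s d _
  unfold Spec_binarySpacing binarySpacing binarySpacing_alt
  simp only [pvAltLoop]
  rw [pvFoldlAppend]
  simp only [List.nil_append]
  by_cases h1 : d < 256
  · simp only [if_pos h1, pvAltFormat, pvPad_eq 8 (8 - s.toList.length) s.toList rfl]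
    rw [show PySem.List.pyRange 0 ((8:Nat):Int) 4 = [0, 4] from by decide]
    simp only [List.map]
    norm_num [List.intercalate, List.intersperse]
    rw [pvSliceTakeN _ 8 4 (by norm_num) (by norm_num),
      pvSliceTakeI _ 8 4 8 (by norm_num) (by norm_num) (by norm_num)]
  · rw [if_neg h1, if_neg h1]
    by_cases h2 : d < 4096
    · simp only [if_pos h2, if_pos (show (256:Int) ≤ d ∧ d < 4096 from ⟨by omega, h2⟩), pvAltFormat, pvPad_eq 12 (12 - s.toList.length) s.toList rfl]
      rw [show PySem.List.pyRange 0 ((12:Nat):Int) 4 = [0, 4, 8] from by decide]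
      simp only [List.map]
      norm_num [List.intercalate, List.intersperse]
      rw [pvSliceTakeN _ 12 4 (by norm_num) (by norm_num),
        pvSliceTakeI _ 12 4 8 (by norm_num) (by norm_num) (by norm_num),
        pvSliceTakeI _ 12 8 12 (by norm_num) (by norm_num) (by norm_num)]
    · rw [if_neg (by omega : ¬ ((256:Int) ≤ d ∧ d < 4096)), if_neg h2]
      by_cases h3 : d < 65536
      · simp only [if_pos h3, if_pos (show (4096:Int) ≤ d ∧ d < 65536 from ⟨by omega, h3⟩), pvAltFormat, pvPad_eq 16 (16 - s.toList.length) s.toList rfl]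
        rw [show PySem.List.pyRange 0 ((16:Nat):Int) 4 = [0, 4, 8, 12] from by decide]
        simp only [List.map]
        norm_num [List.intercalate, List.intersperse]
        rw [pvSliceTakeN _ 16 4 (by norm_num) (by norm_num),
          pvSliceTakeI _ 16 4 8 (by norm_num) (by norm_num) (by norm_num),
          pvSliceTakeI _ 16 8 12 (by norm_num) (by norm_num) (by norm_num),
          pvSliceTakeI _ 16 12 16 (by norm_num) (by norm_num) (by norm_num)]
      · rw [if_neg (by omega : ¬ ((4096:Int) ≤ d ∧ d < 65536)), if_neg h3]
        by_cases h4 : d < 16777216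
        · simp only [if_pos h4, if_pos (show (65536:Int) ≤ d ∧ d < 16777216 from ⟨by omega, h4⟩), pvAltFormat, pvPad_eq 20 (20 - s.toList.length) s.toList rfl]
          rw [show PySem.List.pyRange 0 ((20:Nat):Int) 4 = [0, 4, 8, 12, 16] from by decide]
          simp only [List.map]
          norm_num [List.intercalate, List.intersperse]
          rw [pvSliceTakeN _ 20 4 (by norm_num) (by norm_num),
            pvSliceTakeI _ 20 4 8 (by norm_num) (by norm_num) (by norm_num),
            pvSliceTakeI _ 20 8 12 (by norm_num) (by norm_num) (by norm_num),
            pvSliceTakeI _ 20 12 16 (by norm_num) (by norm_num) (by norm_num),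
            pvSliceTakeI _ 20 16 20 (by norm_num) (by norm_num) (by norm_num)]
        · rw [if_neg (by omega : ¬ ((65536:Int) ≤ d ∧ d < 16777216)), if_neg h4]
          by_cases h5 : d < 268435456
          · simp only [if_pos h5, if_pos (show (16777216:Int) ≤ d ∧ d < 268435456 from ⟨by omega, h5⟩), pvAltFormat, pvPad_eq 24 (24 - s.toList.length) s.toList rfl]
            rw [show PySem.List.pyRange 0 ((24:Nat):Int) 4 = [0, 4, 8, 12, 16, 20] from by decide]
            simp only [List.map]
            norm_num [List.intercalate, List.intersperse]
            rw [pvSliceTakeN _ 24 4 (by norm_num) (by norm_num),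
              pvSliceTakeI _ 24 4 8 (by norm_num) (by norm_num) (by norm_num),
              pvSliceTakeI _ 24 8 12 (by norm_num) (by norm_num) (by norm_num),
              pvSliceTakeI _ 24 12 16 (by norm_num) (by norm_num) (by norm_num),
              pvSliceTakeI _ 24 16 20 (by norm_num) (by norm_num) (by norm_num),
              pvSliceTakeI _ 24 20 24 (by norm_num) (by norm_num) (by norm_num)]
          · rw [if_neg (by omega : ¬ ((16777216:Int) ≤ d ∧ d < 268435456)), if_neg h5]
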